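-- pv_equiv track=rewrite | github.com/LordSahandii/Calculator | final1.py | inputnegative
-- ===== SOURCE A (Python) =====
-- def inputnegative(x):
--
--         x = list(x)
--         b2=[]
--         b3=x + list("-")
--         i=0
--         w=""
--         while i<len(x):
--             if b3[i]!="-":
--                 w=w+str(b3[i])
--                 while b3[i+1]!="-":
--                     w=w+str(x[i+1])
--                     i=i+1
--                 b2.append (w)
--             w=""
--             i=i+1
--         return b2
-- ===== SOURCE B (Python) =====
-- def inputnegative(x):
--     groups = [[]]
--     for s in x:
--         if s == "-":
--             groups.append([])
--         else:
--             groups[-1].append(s)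
--     return ["".join(g) for g in groups if g]
-- ===== Notes on version B (the rewrite author's own statement) =====
-- stated objective: faster
-- what changed: Replaced A's index-driven scan (sentinel-extended copy, nested inner while-loop, token built by repeated string concatenation w = w + c) by a single flat pass that splits the list into groups at "-" elements and then joins each group with ''.join, dropping empty groups.
import Mathlib
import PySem

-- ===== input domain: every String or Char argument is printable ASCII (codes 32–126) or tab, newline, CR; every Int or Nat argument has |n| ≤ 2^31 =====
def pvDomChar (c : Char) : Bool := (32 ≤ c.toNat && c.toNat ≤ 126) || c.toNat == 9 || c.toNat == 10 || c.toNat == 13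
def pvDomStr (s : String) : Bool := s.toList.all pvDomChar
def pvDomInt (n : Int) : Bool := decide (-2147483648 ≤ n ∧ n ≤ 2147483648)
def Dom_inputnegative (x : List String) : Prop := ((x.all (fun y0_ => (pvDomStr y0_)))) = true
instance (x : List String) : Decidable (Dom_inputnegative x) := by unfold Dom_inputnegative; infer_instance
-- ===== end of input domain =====

-- B replaces A's index-driven nested while scan (sentinel-extended copy, token built by
-- repeated string concatenation) by a single flat pass that splits the list into groups at
-- "-" and joins each group, dropping empty groups (objective: faster; measured by the
-- timing run: A's repeated concatenation is quadratic in token length, B's join is linear).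

-- ===== PORT A =====
-- inner while loop: `while b3[i+1]!="-": w=w+str(x[i+1]); i=i+1`.  Fuel makes the
-- recursion structural; with fuel = x.length it never runs out (i advances each step).
-- Indices are always in range when reached (b3 = x ++ ["-"] ends with "-"), so getD's
-- defaults are never used and the port is exact.
def pvInner (fuel : Nat) (x b3 : List String) (i : Nat) (w : String) : Nat × String :=
  match fuel with
  | 0 => (i, w)
  | f+1 =>
    if b3.getD (i+1) "-" ≠ "-" then
      pvInner f x b3 (i+1) (w ++ x.getD (i+1) "")
    else (i, w)

-- outer while loop: `while i<len(x): …`; fuel = x.length suffices since i increases each pass.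
def pvOuter (fuel : Nat) (x b3 : List String) (i : Nat) (b2 : List String) : List String :=
  match fuel with
  | 0 => b2
  | f+1 =>
    if i < x.length then
      if b3.getD i "-" ≠ "-" then
        let p := pvInner x.length x b3 i ("" ++ b3.getD i "-")
        pvOuter f x b3 (p.1 + 1) (b2 ++ [p.2])
      else pvOuter f x b3 (i + 1) b2
    else b2

def inputnegative (x : List String) : List String :=
  pvOuter x.length x (x ++ ["-"]) 0 []

-- ===== PORT B =====
-- groups[-1].append(s)
def pvUpdateLast (f : List String → List String) : List (List String) → List (List String)
  | [] => []
  | [g] => [f g]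
  | g :: g' :: gs => g :: pvUpdateLast f (g' :: gs)

def pvStep (groups : List (List String)) (s : String) : List (List String) :=
  if s = "-" then groups ++ [[]] else pvUpdateLast (fun g => g ++ [s]) groups

-- "".join(g)
def pvJoin (g : List String) : String := g.foldl (· ++ ·) ""

def inputnegative_alt (x : List String) : List String :=
  ((x.foldl pvStep [[]]).filter (fun g => !g.isEmpty)).map pvJoin

-- ===== PRECONDITION & SPEC =====
def Spec_inputnegative (x : List String) (out : List String) : Prop := out = inputnegative_alt x
instance (x : List String) (out : List String) : Decidable (Spec_inputnegative x out) := by unfold Spec_inputnegative; infer_instance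

-- ===== CLAIM (what is proved, stated in full; the proofs are below) =====
def Claim_equal_inputnegative : Prop := ∀ (x : List String), Dom_inputnegative x → Spec_inputnegative x (inputnegative x)

-- ===== LEMMAS AND PROOFS =====

-- (w', k) = final accumulator and number of elements consumed by one maximal run of non-"-" elements
def runP : List String → String → String × Nat
  | [], w => (w, 0)
  | s :: t, w =>
    if s = "-" then (w, 0)
    else
      let p := runP t (w ++ s)
      (p.1, p.2 + 1)

-- reference tokenizer, run-at-a-time (shape of A's loop, index-free)
def tokS : List String → List String
  | [] => []
  | s :: t =>
    if s = "-" then tokS t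
    else (runP t s).1 :: tokS (t.drop (runP t s).2)
termination_by t => t.length
decreasing_by
  all_goals (simp [List.length_drop]; try omega)

-- reference tokenizer, element-at-a-time with current group (shape of B's fold)
def midT : List String → List String → List String
  | [], cur => if cur = [] then [] else [pvJoin cur]
  | s :: t, cur =>
    if s = "-" then (if cur = [] then [] else [pvJoin cur]) ++ midT t []
    else midT t (cur ++ [s])

theorem runP_acc (t : List String) : ∀ w, runP t w = (w ++ (runP t "").1, (runP t "").2) := by
  induction t with
  | nil => intro w; simp [runP]
  | cons s t ih =>
    intro w
    by_cases hs : s = "-"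
    · simp [runP, hs]
    · simp only [runP, if_neg hs]
      rw [ih (w ++ s), ih ("" ++ s)]
      simp [String.append_assoc]

theorem inner_spec (x : List String) :
    ∀ F i w, i < x.length → x.length - i - 1 ≤ F →
      pvInner F x (x ++ ["-"]) i w
        = (i + (runP (x.drop (i+1)) w).2, (runP (x.drop (i+1)) w).1) := by
  intro F
  induction F with
  | zero =>
    intro i w hi hF
    have : i + 1 = x.length := by omega
    simp [pvInner, List.drop_eq_nil_of_le (le_of_eq this.symm), runP]
  | succ f ih =>
    intro i w hi hF
    by_cases h1 : i + 1 < x.length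
    · have hget : (x ++ ["-"])[i+1]? = some x[i+1] := by
        rw [List.getElem?_append_left h1]
        exact List.getElem?_eq_getElem h1
      have hgetD : (x ++ ["-"]).getD (i+1) "-" = x[i+1] := by
        simp [List.getD_eq_getElem?_getD, hget]
      have hdrop : x.drop (i+1) = x[i+1] :: x.drop (i+2) := by
        rw [List.drop_eq_getElem_cons h1]
      by_cases hs : x[i+1] = "-"
      · simp [pvInner, hget, hs, hdrop, runP]
      · have hgx : x.getD (i+1) "" = x[i+1] := List.getD_eq_getElem x "" h1
        rw [pvInner, if_pos (by rw [hgetD]; exact hs), hgx,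
            ih (i+1) (w ++ x[i+1]) h1 (by omega), hdrop]
        simp only [show i + 1 + 1 = i + 2 from rfl]
        simp [runP, hs]
        omega
    · have hlen : i + 1 = x.length := by omega
      have hget : (x ++ ["-"])[i+1]? = some "-" := by
        rw [hlen]
        simp
      simp [pvInner, hget, List.drop_eq_nil_of_le (le_of_eq hlen.symm), runP]

theorem outer_spec (x : List String) :
    ∀ F i b2, x.length - i ≤ F →
      pvOuter F x (x ++ ["-"]) i b2 = b2 ++ tokS (x.drop i) := by
  intro F
  induction F with
  | zero =>
    intro i b2 hF
    simp [pvOuter, List.drop_eq_nil_of_le (by omega : x.length ≤ i), tokS]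
  | succ f ih =>
    intro i b2 hF
    by_cases hi : i < x.length
    · have hget : (x ++ ["-"])[i]? = some x[i] := by
        rw [List.getElem?_append_left hi]
        exact List.getElem?_eq_getElem hi
      have hgetD : (x ++ ["-"]).getD i "-" = x[i] := by
        simp [List.getD_eq_getElem?_getD, hget]
      have hdrop : x.drop i = x[i] :: x.drop (i+1) := by
        rw [List.drop_eq_getElem_cons hi]
      by_cases hs : x[i] = "-"
      · rw [pvOuter, if_pos hi, if_neg (by simp [hget, hs]),
            ih (i+1) b2 (by omega), hdrop, tokS]
        simp [hs]
      · rw [pvOuter, if_pos hi, if_pos (by rw [hgetD]; exact hs), hgetD,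
            inner_spec x x.length i ("" ++ x[i]) hi (by omega),
            ih _ _ (by omega)]
        rw [hdrop, tokS, if_neg hs]
        have hw : "" ++ x[i] = x[i] := by simp
        rw [hw]
        simp [List.drop_drop]
        have harith : i + (runP (x.drop (i+1)) x[i]).2 + 1
            = i + 1 + (runP (x.drop (i+1)) x[i]).2 := by omega
        rw [harith]
    · simp [pvOuter, hi, List.drop_eq_nil_of_le (by omega : x.length ≤ i), tokS]

theorem pvJoin_append_singleton (g : List String) (s : String) :
    pvJoin (g ++ [s]) = pvJoin g ++ s := by
  simp [pvJoin, List.foldl_append]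

-- tokS = midT, plus the characterization of midT inside a nonempty run
theorem tokS_midT_aux :
    ∀ n (t : List String), t.length ≤ n →
      (tokS t = midT t []) ∧
      (∀ cur, cur ≠ [] →
        midT t cur = (pvJoin cur ++ (runP t "").1) :: tokS (t.drop (runP t "").2)) := by
  intro n
  induction n with
  | zero =>
    intro t ht
    have : t = [] := List.eq_nil_of_length_eq_zero (by omega)
    subst this
    refine ⟨by simp [tokS, midT], ?_⟩
    intro cur hc
    simp [midT, hc, tokS, runP]
  | succ n ih =>
    intro t ht
    match t with
    | [] =>
      refine ⟨by simp [tokS, midT], ?_⟩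
      intro cur hc
      simp [midT, hc, tokS, runP]
    | s :: t' =>
      have ht' : t'.length ≤ n := by simpa using Nat.lt_succ_iff.mp (by simpa using ht)
      constructor
      · by_cases hs : s = "-"
        · rw [tokS, if_pos hs, midT]
          simp [hs, (ih t' ht').1]
        · rw [tokS, if_neg hs, midT, if_neg hs]
          simp only [List.nil_append]
          rw [(ih t' ht').2 [s] (by simp), runP_acc t' s]
          simp [pvJoin]
      · intro cur hc
        by_cases hs : s = "-"
        · have htok : tokS (s :: t') = tokS t' := by rw [tokS, if_pos hs]
          rw [midT, if_pos hs, runP, if_pos hs, if_neg hc, ← (ih t' ht').1,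
              List.drop_zero, htok]
          simp
        · rw [midT, if_neg hs]
          rw [(ih t' ht').2 (cur ++ [s]) (by simp)]
          rw [runP, if_neg hs]
          rw [runP_acc t' ("" ++ s)]
          simp [pvJoin_append_singleton, String.append_assoc]

def pvFin (gs : List (List String)) : List String :=
  (gs.filter (fun g => !g.isEmpty)).map pvJoin

theorem updateLast_append (f : List String → List String) :
    ∀ (gs : List (List String)) (c : List String),
      pvUpdateLast f (gs ++ [c]) = gs ++ [f c] := by
  intro gs
  induction gs with
  | nil => intro c; simp [pvUpdateLast]
  | cons g gs ih =>
    intro c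
    cases gs with
    | nil => simp [pvUpdateLast]
    | cons g' gs' =>
      simp only [List.cons_append, pvUpdateLast]
      simpa using ih c

theorem fold_spec :
    ∀ (t : List String) (gs : List (List String)) (cur : List String),
      pvFin (t.foldl pvStep (gs ++ [cur])) = pvFin gs ++ midT t cur := by
  intro t
  induction t with
  | nil =>
    intro gs cur
    by_cases hc : cur = [] <;>
      simp [pvFin, midT, hc, List.filter_append, List.map_append]
  | cons s t ih =>
    intro gs cur
    by_cases hs : s = "-"
    · have : pvStep (gs ++ [cur]) s = (gs ++ [cur]) ++ [[]] := by simp [pvStep, hs]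
      rw [List.foldl_cons, this, ih (gs ++ [cur]) [], midT, if_pos hs]
      by_cases hc : cur = [] <;>
        simp [pvFin, hc, List.filter_append, List.map_append]
    · have : pvStep (gs ++ [cur]) s = gs ++ [cur ++ [s]] := by
        simp [pvStep, hs, updateLast_append]
      rw [List.foldl_cons, this, ih gs (cur ++ [s]), midT, if_neg hs]

-- ===== VERDICT (by name: the statement is the Claim_ definition above) =====
theorem inputnegative_spec : Claim_equal_inputnegative := by
  intro x _
  unfold Spec_inputnegative inputnegative inputnegative_alt
  rw [outer_spec x x.length 0 [] (by omega)]
  have hb : ((x.foldl pvStep [[]]).filter (fun g => !g.isEmpty)).map pvJoin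
      = pvFin (x.foldl pvStep ([] ++ [[]])) := by simp [pvFin]
  rw [hb, fold_spec x [] []]
  simp [pvFin, (tokS_midT_aux x.length x le_rfl).1]
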